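-- pv_equiv track=rewrite | github.com/super-cooper/memebot | src/lib/util.py | is_spoil
-- ===== SOURCE A (Python) =====
-- from typing import Tuple, List
--
-- def is_spoil(message: str, idx: int) -> bool:
--     """Returns whether idx of message is within a spoiler text"""
--     if idx >= len(message) or idx < 0:
--         return False
--
--     # list of tuples of spoil ranges, [start, stop)
--     # e.g.: blah blah ||bababababababababab||
--     #                   ^start             ^end
--     spoil_ranges: List[Tuple[int, int]] = []
--     in_spoil = False
--     spoil_start = -1
--     i = 0
--     while i < len(message):
--         c = message[i]
--         if c == "\\" and not in_spoil:
--             # ignore backslashes only for the start of the spoiler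
--             i += 1
--         elif c == "|":
--             if i + 1 < len(message) and message[i + 1] == "|":
--                 if in_spoil:
--                     # reached the end of a spoiled section
--                     spoil_ranges.append((spoil_start, i))
--                 else:
--                     # start of spoil section
--                     spoil_start = i + 2
--
--                 i += 1
--                 in_spoil = not in_spoil
--
--         i += 1
--
--     for start, end in spoil_ranges:
--         if start <= idx < end:
--             return True
--     return False
-- ===== SOURCE B (Python) =====
-- def _find_opener(message: str, pos: int) -> int:
--     """Index of the next unescaped '||' at or after pos, or -1.
--     A backslash escapes (skips) the following character."""
--     n = len(message)
--     while pos < n: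
--         c = message[pos]
--         if c == "\\":
--             pos += 2
--         elif c == "|" and pos + 1 < n and message[pos + 1] == "|":
--             return pos
--         else:
--             pos += 1
--     return -1
--
--
-- def is_spoil(message: str, idx: int) -> bool:
--     """Alternating delimiter search: hop from spoiler to spoiler.  Find an
--     opening '||' with escape-aware _find_opener, then find its closing '||'
--     with plain str.find (backslashes are not special inside a spoiler).
--     Spoiler ranges start at strictly increasing positions, so as soon as a
--     range begins past idx the answer is False."""
--     if not (0 <= idx < len(message)):
--         return False
--     pos = 0
--     while True:
--         p = _find_opener(message, pos)
--         if p == -1: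
--             return False
--         start = p + 2
--         if idx < start:
--             return False
--         end = message.find("||", start)
--         if end == -1:
--             return False
--         if idx < end:
--             return True
--         pos = end + 2
-- ===== Notes on version B (the rewrite author's own statement) =====
-- stated objective: alternative
-- what changed: B replaces A's single char-by-char state machine that accumulates a range list and rescans it with an alternating delimiter-hop: an escape-aware search for the next opening '||' followed by a plain str.find for the closing '||', testing idx per range with an early False once ranges start past idx.
import Mathlib
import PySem

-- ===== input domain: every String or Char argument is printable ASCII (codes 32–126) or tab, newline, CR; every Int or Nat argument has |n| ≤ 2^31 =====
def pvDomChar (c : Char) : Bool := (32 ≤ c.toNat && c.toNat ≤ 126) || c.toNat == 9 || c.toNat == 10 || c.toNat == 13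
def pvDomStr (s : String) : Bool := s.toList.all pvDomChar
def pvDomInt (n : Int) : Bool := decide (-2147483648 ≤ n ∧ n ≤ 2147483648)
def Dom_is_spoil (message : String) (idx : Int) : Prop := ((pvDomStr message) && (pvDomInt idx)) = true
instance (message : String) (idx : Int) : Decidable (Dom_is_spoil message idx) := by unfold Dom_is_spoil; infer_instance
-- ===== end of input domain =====

-- B replaces A's build-a-range-list-then-rescan state machine by an alternating delimiter hop (escape-aware opener search + str.find for the closer, early exit); alternative decomposition, same cost.


-- ===== PORT A =====
-- A's while-loop: index i over the chars, building the list of spoil ranges (acc).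
-- fuel is only a totality guard (i strictly increases each step); is_spoil supplies
-- cs.length + 1, which never runs out
def isSpoilLoopA (cs : List Char) (i : Nat) (inSpoil : Bool) (spoilStart : Int)
    (acc : List (Int × Int)) (fuel : Nat) : List (Int × Int) :=
  match fuel with
  | 0 => acc
  | fuel + 1 =>
    if h : i < cs.length then
      if cs[i] = '\\' ∧ inSpoil = false then
        isSpoilLoopA cs (i + 2) inSpoil spoilStart acc fuel
      else if cs[i] = '|' then
        if h2 : i + 1 < cs.length then
          if cs[i + 1] = '|' then
            if inSpoil then
              isSpoilLoopA cs (i + 2) false spoilStart (acc ++ [(spoilStart, (i : Int))]) fuel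
            else
              isSpoilLoopA cs (i + 2) true ((i : Int) + 2) acc fuel
          else
            isSpoilLoopA cs (i + 1) inSpoil spoilStart acc fuel
        else
          isSpoilLoopA cs (i + 1) inSpoil spoilStart acc fuel
      else
        isSpoilLoopA cs (i + 1) inSpoil spoilStart acc fuel
    else acc

def is_spoil (message : String) (idx : Int) : Bool :=
  if idx ≥ (message.toList.length : Int) ∨ idx < 0 then false
  else
    -- for start, end in spoil_ranges: if start <= idx < end: return True / return False
    (isSpoilLoopA message.toList 0 false (-1) [] (message.toList.length + 1)).any
      (fun p => decide (p.1 ≤ idx) && decide (idx < p.2))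

-- ===== PORT B =====
-- _find_opener: next unescaped '||' at or after pos, -1 if none (backslash skips the
-- next char); fuel is only a totality guard (pos strictly increases), callers supply
-- cs.length + 1
def findOpenB (cs : List Char) (pos fuel : Nat) : Int :=
  match fuel with
  | 0 => -1
  | fuel + 1 =>
    if h : pos < cs.length then
      if cs[pos] = '\\' then findOpenB cs (pos + 2) fuel
      else if cs[pos] = '|' then
        if h2 : pos + 1 < cs.length then
          if cs[pos + 1] = '|' then (pos : Int) else findOpenB cs (pos + 1) fuel
        else findOpenB cs (pos + 1) fuel
      else findOpenB cs (pos + 1) fuel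
    else -1

-- main loop of B: hop from spoiler to spoiler (opener via findOpenB, closer via
-- str.find); fuel is only a totality guard, is_spoil_alt supplies cs.length + 1
def isSpoilB (cs : List Char) (idx : Int) (pos fuel : Nat) : Bool :=
  match fuel with
  | 0 => false
  | fuel + 1 =>
    if findOpenB cs pos (cs.length + 1) = -1 then false
    else if idx < findOpenB cs pos (cs.length + 1) + 2 then false
    else if PySem.Chars.findFrom cs ['|', '|'] (findOpenB cs pos (cs.length + 1) + 2) none
        = -1 then false
    else if idx < PySem.Chars.findFrom cs ['|', '|']
        (findOpenB cs pos (cs.length + 1) + 2) none then true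
    else isSpoilB cs idx
      ((PySem.Chars.findFrom cs ['|', '|']
        (findOpenB cs pos (cs.length + 1) + 2) none).toNat + 2) fuel

def is_spoil_alt (message : String) (idx : Int) : Bool :=
  if ¬ (0 ≤ idx ∧ idx < (message.toList.length : Int)) then false
  else isSpoilB message.toList idx 0 (message.toList.length + 1)

-- ===== PRECONDITION & SPEC =====
def Spec_is_spoil (message : String) (idx : Int) (out : Bool) : Prop := out = is_spoil_alt message idx
instance (message : String) (idx : Int) (out : Bool) : Decidable (Spec_is_spoil message idx out) := by unfold Spec_is_spoil; infer_instance

-- ===== CLAIM (what is proved, stated in full; the proofs are below) =====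
def Claim_equal_is_spoil : Prop := ∀ (message : String) (idx : Int), Dom_is_spoil message idx → Spec_is_spoil message idx (is_spoil message idx)

-- ===== LEMMAS AND PROOFS =====

-- fuel-free twin of isSpoilLoopA (proof-side only; the bridge lemma loopA_fuel
-- shows the port computes it for sufficient fuel)
def loopAW (cs : List Char) (i : Nat) (inSpoil : Bool) (spoilStart : Int)
    (acc : List (Int × Int)) : List (Int × Int) :=
  if h : i < cs.length then
    if cs[i] = '\\' ∧ inSpoil = false then
      loopAW cs (i + 2) inSpoil spoilStart acc
    else if cs[i] = '|' then
      if h2 : i + 1 < cs.length then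
        if cs[i + 1] = '|' then
          if inSpoil then
            loopAW cs (i + 2) false spoilStart (acc ++ [(spoilStart, (i : Int))])
          else
            loopAW cs (i + 2) true ((i : Int) + 2) acc
        else
          loopAW cs (i + 1) inSpoil spoilStart acc
      else
        loopAW cs (i + 1) inSpoil spoilStart acc
    else
      loopAW cs (i + 1) inSpoil spoilStart acc
  else acc
termination_by cs.length - i

-- fuel-free twin of findOpenB
def findOpenW (cs : List Char) (pos : Nat) : Int :=
  if h : pos < cs.length then
    if cs[pos] = '\\' then findOpenW cs (pos + 2)
    else if cs[pos] = '|' then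
      if h2 : pos + 1 < cs.length then
        if cs[pos + 1] = '|' then (pos : Int) else findOpenW cs (pos + 1)
      else findOpenW cs (pos + 1)
    else findOpenW cs (pos + 1)
  else -1
termination_by cs.length - pos

-- the fuel guard never fires with the fuel the ports supply
theorem loopA_fuel (cs : List Char) :
    ∀ (fuel : Nat) (i : Nat) (b : Bool) (ss : Int) (acc : List (Int × Int)),
      cs.length - i < fuel → isSpoilLoopA cs i b ss acc fuel = loopAW cs i b ss acc := by
  intro fuel
  induction fuel with
  | zero => intro i b ss acc h; omega
  | succ fuel IH =>
    intro i b ss acc h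
    rw [isSpoilLoopA]
    conv_rhs => rw [loopAW.eq_def]
    by_cases h1 : i < cs.length
    · rw [dif_pos h1, dif_pos h1]
      split_ifs <;> first | rfl | (apply IH; omega)
    · rw [dif_neg h1, dif_neg h1]

theorem findOpen_fuel (cs : List Char) :
    ∀ (fuel : Nat) (pos : Nat),
      cs.length - pos < fuel → findOpenB cs pos fuel = findOpenW cs pos := by
  intro fuel
  induction fuel with
  | zero => intro pos h; omega
  | succ fuel IH =>
    intro pos h
    rw [findOpenB]
    conv_rhs => rw [findOpenW.eq_def]
    by_cases h1 : pos < cs.length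
    · rw [dif_pos h1, dif_pos h1]
      split_ifs <;> first | rfl | (apply IH; omega)
    · rw [dif_neg h1, dif_neg h1]

-- proof-side mirror of str.find('||', k): first index ≥ k where '||' occurs
def findClose (cs : List Char) (pos : Nat) : Option Nat :=
  if h : pos + 1 < cs.length then
    if cs[pos] = '|' ∧ cs[pos + 1] = '|' then some pos
    else findClose cs (pos + 1)
  else none
termination_by cs.length - pos

-- bounds of the opener search
theorem findOpenW_bounds (cs : List Char) (pos : Nat) :
    findOpenW cs pos = -1 ∨
      ((pos : Int) ≤ findOpenW cs pos ∧ findOpenW cs pos + 1 < (cs.length : Int)) := by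
  fun_induction findOpenW cs pos <;> omega

-- stepping equations for findOpenW (one unfolding each, LHS only)
theorem fo_end (cs : List Char) (i : Nat) (h : ¬ i < cs.length) : findOpenW cs i = -1 := by
  conv_lhs => rw [findOpenW.eq_def]
  rw [dif_neg h]

theorem fo_bs (cs : List Char) (i : Nat) (h : i < cs.length) (hb : cs[i] = '\\') :
    findOpenW cs i = findOpenW cs (i + 2) := by
  conv_lhs => rw [findOpenW.eq_def]
  rw [dif_pos h, if_pos hb]

theorem fo_hit (cs : List Char) (i : Nat) (h : i < cs.length) (hp : cs[i] = '|')
    (h2 : i + 1 < cs.length) (hp2 : cs[i + 1] = '|') : findOpenW cs i = (i : Int) := by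
  conv_lhs => rw [findOpenW.eq_def]
  rw [dif_pos h, if_neg (by simp [hp]), if_pos hp, dif_pos h2, if_pos hp2]

theorem fo_step1 (cs : List Char) (i : Nat) (h : i < cs.length) (hb : ¬ cs[i] = '\\')
    (hp : ¬ cs[i] = '|') : findOpenW cs i = findOpenW cs (i + 1) := by
  conv_lhs => rw [findOpenW.eq_def]
  rw [dif_pos h, if_neg hb, if_neg hp]

theorem fo_step2 (cs : List Char) (i : Nat) (h : i < cs.length) (hp : cs[i] = '|')
    (h2 : ¬ i + 1 < cs.length) : findOpenW cs i = findOpenW cs (i + 1) := by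
  conv_lhs => rw [findOpenW.eq_def]
  rw [dif_pos h, if_neg (by simp [hp]), if_pos hp, dif_neg h2]

theorem fo_step3 (cs : List Char) (i : Nat) (h : i < cs.length) (hp : cs[i] = '|')
    (h2 : i + 1 < cs.length) (hp2 : ¬ cs[i + 1] = '|') :
    findOpenW cs i = findOpenW cs (i + 1) := by
  conv_lhs => rw [findOpenW.eq_def]
  rw [dif_pos h, if_neg (by simp [hp]), if_pos hp, dif_pos h2, if_neg hp2]

-- stepping equations for findClose
theorem fc_end (cs : List Char) (i : Nat) (h : ¬ i + 1 < cs.length) : findClose cs i = none := by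
  conv_lhs => rw [findClose.eq_def]
  rw [dif_neg h]

theorem fc_hit (cs : List Char) (i : Nat) (h : i + 1 < cs.length) (hp : cs[i] = '|')
    (hp2 : cs[i + 1] = '|') : findClose cs i = some i := by
  conv_lhs => rw [findClose.eq_def]
  rw [dif_pos h, if_pos ⟨hp, hp2⟩]

theorem fc_step (cs : List Char) (i : Nat) (h : i + 1 < cs.length)
    (hpat : ¬ (cs[i] = '|' ∧ cs[i + 1] = '|')) : findClose cs i = findClose cs (i + 1) := by
  conv_lhs => rw [findClose.eq_def]
  rw [dif_pos h, if_neg hpat]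

-- stepping equations for A's loop, out-of-spoiler state
theorem la_end (cs : List Char) (i : Nat) (b : Bool) (ss : Int) (acc : List (Int × Int))
    (h : ¬ i < cs.length) : loopAW cs i b ss acc = acc := by
  conv_lhs => rw [loopAW.eq_def]
  rw [dif_neg h]

theorem laF_bs (cs : List Char) (i : Nat) (ss : Int) (acc : List (Int × Int))
    (h : i < cs.length) (hb : cs[i] = '\\') :
    loopAW cs i false ss acc = loopAW cs (i + 2) false ss acc := by
  conv_lhs => rw [loopAW.eq_def]
  rw [dif_pos h, if_pos ⟨hb, rfl⟩]

theorem laF_hit (cs : List Char) (i : Nat) (ss : Int) (acc : List (Int × Int))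
    (h : i < cs.length) (hp : cs[i] = '|') (h2 : i + 1 < cs.length) (hp2 : cs[i + 1] = '|') :
    loopAW cs i false ss acc = loopAW cs (i + 2) true ((i : Int) + 2) acc := by
  conv_lhs => rw [loopAW.eq_def]
  rw [dif_pos h, if_neg (by simp [hp]), if_pos hp, dif_pos h2, if_pos hp2, if_neg (by simp)]

theorem laF_step1 (cs : List Char) (i : Nat) (ss : Int) (acc : List (Int × Int))
    (h : i < cs.length) (hb : ¬ cs[i] = '\\') (hp : ¬ cs[i] = '|') :
    loopAW cs i false ss acc = loopAW cs (i + 1) false ss acc := by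
  conv_lhs => rw [loopAW.eq_def]
  rw [dif_pos h, if_neg (by simp [hb]), if_neg hp]

theorem laF_step2 (cs : List Char) (i : Nat) (ss : Int) (acc : List (Int × Int))
    (h : i < cs.length) (hp : cs[i] = '|') (h2 : ¬ i + 1 < cs.length) :
    loopAW cs i false ss acc = loopAW cs (i + 1) false ss acc := by
  conv_lhs => rw [loopAW.eq_def]
  rw [dif_pos h, if_neg (by simp [hp]), if_pos hp, dif_neg h2]

theorem laF_step3 (cs : List Char) (i : Nat) (ss : Int) (acc : List (Int × Int))
    (h : i < cs.length) (hp : cs[i] = '|') (h2 : i + 1 < cs.length) (hp2 : ¬ cs[i + 1] = '|') :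
    loopAW cs i false ss acc = loopAW cs (i + 1) false ss acc := by
  conv_lhs => rw [loopAW.eq_def]
  rw [dif_pos h, if_neg (by simp [hp]), if_pos hp, dif_pos h2, if_neg hp2]

-- stepping equations for A's loop, in-spoiler state
theorem laT_hit (cs : List Char) (i : Nat) (ss : Int) (acc : List (Int × Int))
    (h : i < cs.length) (hp : cs[i] = '|') (h2 : i + 1 < cs.length) (hp2 : cs[i + 1] = '|') :
    loopAW cs i true ss acc = loopAW cs (i + 2) false ss (acc ++ [(ss, (i : Int))]) := by
  conv_lhs => rw [loopAW.eq_def]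
  rw [dif_pos h, if_neg (by simp), if_pos hp, dif_pos h2, if_pos hp2, if_pos rfl]

theorem laT_step1 (cs : List Char) (i : Nat) (ss : Int) (acc : List (Int × Int))
    (h : i < cs.length) (hp : ¬ cs[i] = '|') :
    loopAW cs i true ss acc = loopAW cs (i + 1) true ss acc := by
  conv_lhs => rw [loopAW.eq_def]
  rw [dif_pos h, if_neg (by simp), if_neg hp]

theorem laT_step2 (cs : List Char) (i : Nat) (ss : Int) (acc : List (Int × Int))
    (h : i < cs.length) (hp : cs[i] = '|') (h2 : ¬ i + 1 < cs.length) :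
    loopAW cs i true ss acc = loopAW cs (i + 1) true ss acc := by
  conv_lhs => rw [loopAW.eq_def]
  rw [dif_pos h, if_neg (by simp), if_pos hp, dif_neg h2]

theorem laT_step3 (cs : List Char) (i : Nat) (ss : Int) (acc : List (Int × Int))
    (h : i < cs.length) (hp : cs[i] = '|') (h2 : i + 1 < cs.length) (hp2 : ¬ cs[i + 1] = '|') :
    loopAW cs i true ss acc = loopAW cs (i + 1) true ss acc := by
  conv_lhs => rw [loopAW.eq_def]
  rw [dif_pos h, if_neg (by simp), if_pos hp, dif_pos h2, if_neg hp2]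

theorem findClose_none (cs : List Char) (k : Nat) (h : findClose cs k = none) :
    ∀ j, k ≤ j → (hj : j + 1 < cs.length) → ¬ (cs[j] = '|' ∧ cs[j + 1] = '|') := by
  intro j hkj hj hpat
  by_cases h1 : k + 1 < cs.length
  · by_cases hc : cs[k] = '|' ∧ cs[k + 1] = '|'
    · rw [fc_hit cs k h1 hc.1 hc.2] at h; simp at h
    · rw [fc_step cs k h1 hc] at h
      rcases Nat.eq_or_lt_of_le hkj with rfl | hlt
      · exact hc hpat
      · exact findClose_none cs (k + 1) h j hlt hj hpat
  · omega
termination_by cs.length - k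

theorem findClose_some (cs : List Char) (k e : Nat) (h : findClose cs k = some e) :
    k ≤ e ∧ e + 1 < cs.length ∧
      (∃ (he : e + 1 < cs.length), cs[e] = '|' ∧ cs[e + 1] = '|') ∧
      ∀ j, k ≤ j → j < e → (hj : j + 1 < cs.length) → ¬ (cs[j] = '|' ∧ cs[j + 1] = '|') := by
  by_cases h1 : k + 1 < cs.length
  · by_cases hc : cs[k] = '|' ∧ cs[k + 1] = '|'
    · rw [fc_hit cs k h1 hc.1 hc.2] at h
      obtain rfl : k = e := Option.some.inj h
      exact ⟨le_refl _, h1, ⟨h1, hc⟩, fun j ha hb _ _ => by omega⟩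
    · rw [fc_step cs k h1 hc] at h
      obtain ⟨a, b, c, d⟩ := findClose_some cs (k + 1) e h
      refine ⟨by omega, b, c, fun j hkj hje hj hpat => ?_⟩
      rcases Nat.eq_or_lt_of_le hkj with rfl | hlt
      · exact hc hpat
      · exact d j hlt hje hj hpat
  · rw [fc_end cs k h1] at h; simp at h
termination_by cs.length - k

-- '||' is a prefix of l iff its first two entries are '|'
theorem pat_prefix_iff (l : List Char) :
    (['|', '|'] <+: l) ↔ l[0]? = some '|' ∧ l[1]? = some '|' := by
  match l with
  | [] => simp
  | [a] => simp [List.cons_prefix_cons]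
  | a :: b :: t =>
    simp only [List.cons_prefix_cons, List.nil_prefix, and_true, List.getElem?_cons_zero,
      List.getElem?_cons_succ, Option.some.injEq]
    exact ⟨fun h => ⟨h.1.symm, h.2.symm⟩, fun h => ⟨h.1.symm, h.2.symm⟩⟩

theorem pat_at_iff (cs : List Char) (j : Nat) :
    (['|', '|'] <+: cs.drop j) ↔ ∃ (h : j + 1 < cs.length), cs[j] = '|' ∧ cs[j + 1] = '|' := by
  rw [pat_prefix_iff]
  rw [List.getElem?_drop, List.getElem?_drop]
  constructor
  · rintro ⟨h0, h1⟩
    obtain ⟨hb1, e1⟩ := List.getElem?_eq_some_iff.mp h1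
    obtain ⟨hb0, e0⟩ := List.getElem?_eq_some_iff.mp h0
    exact ⟨hb1, e0, e1⟩
  · rintro ⟨hb, e0, e1⟩
    exact ⟨List.getElem?_eq_some_iff.mpr ⟨by omega, e0⟩, List.getElem?_eq_some_iff.mpr ⟨hb, e1⟩⟩

-- bridge: str.find('||', k) computes exactly what findClose computes
theorem findFrom_eq_findClose (cs : List Char) (k : Nat) (hk : k ≤ cs.length) :
    PySem.Chars.findFrom cs ['|', '|'] (k : Int) none =
      ((findClose cs k).elim (-1) (fun e => (e : Int))) := by
  cases hfc : findClose cs k with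
  | none =>
    simp only [Option.elim]
    by_contra hne
    obtain ⟨hge, hpre, _⟩ := PySem.Chars.findFrom_natCast_spec cs ['|', '|'] k hk hne
    obtain ⟨hb, e0, e1⟩ :=
      (pat_at_iff cs (PySem.Chars.findFrom cs ['|', '|'] (k : Int) none).toNat).mp hpre
    exact findClose_none cs k hfc _ (by omega) hb ⟨e0, e1⟩
  | some e =>
    obtain ⟨hke, he1, ⟨he1', p0, p1⟩, hmin⟩ := findClose_some cs k e hfc
    have hinf : ['|', '|'] <:+: cs.drop k := by
      rw [List.infix_iff_prefix_suffix]
      refine ⟨cs.drop e, (pat_at_iff cs e).mpr ⟨he1, p0, p1⟩, ?_⟩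
      have hdd : cs.drop e = (cs.drop k).drop (e - k) := by
        rw [List.drop_drop]; congr 1; omega
      rw [hdd]; exact List.drop_suffix _ _
    have hne : PySem.Chars.findFrom cs ['|', '|'] (k : Int) none ≠ -1 := by
      intro hcon
      exact ((PySem.Chars.findFrom_natCast_eq_neg_one_iff cs ['|', '|'] k hk).mp hcon) hinf
    obtain ⟨hge, hpre, hmin'⟩ := PySem.Chars.findFrom_natCast_spec cs ['|', '|'] k hk hne
    obtain ⟨hb, e0, e1⟩ :=
      (pat_at_iff cs (PySem.Chars.findFrom cs ['|', '|'] (k : Int) none).toNat).mp hpre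
    have hnotlt : ¬ (PySem.Chars.findFrom cs ['|', '|'] (k : Int) none).toNat < e :=
      fun hlt => hmin _ (by omega) hlt hb ⟨e0, e1⟩
    have hnotgt : ¬ e < (PySem.Chars.findFrom cs ['|', '|'] (k : Int) none).toNat :=
      fun hlt => hmin' e hke hlt ((pat_at_iff cs e).mpr ⟨he1, p0, p1⟩)
    simp only [Option.elim]
    omega

-- A's loop in out-of-spoiler state walks exactly like findOpenW
theorem loopA_open (cs : List Char) (i : Nat) (ss : Int) (acc : List (Int × Int)) :
    loopAW cs i false ss acc =
      (if findOpenW cs i = -1 then acc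
       else loopAW cs ((findOpenW cs i).toNat + 2) true (findOpenW cs i + 2) acc) := by
  by_cases h : i < cs.length
  · by_cases hb : cs[i] = '\\'
    · rw [laF_bs cs i ss acc h hb, fo_bs cs i h hb]
      exact loopA_open cs (i + 2) ss acc
    · by_cases hp : cs[i] = '|'
      · by_cases h2 : i + 1 < cs.length
        · by_cases hp2 : cs[i + 1] = '|'
          · rw [laF_hit cs i ss acc h hp h2 hp2, fo_hit cs i h hp h2 hp2,
              if_neg (by omega)]
            simp
          · rw [laF_step3 cs i ss acc h hp h2 hp2, fo_step3 cs i h hp h2 hp2]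
            exact loopA_open cs (i + 1) ss acc
        · rw [laF_step2 cs i ss acc h hp h2, fo_step2 cs i h hp h2]
          exact loopA_open cs (i + 1) ss acc
      · rw [laF_step1 cs i ss acc h hb hp, fo_step1 cs i h hb hp]
        exact loopA_open cs (i + 1) ss acc
  · rw [la_end cs i false ss acc h, fo_end cs i h, if_pos rfl]
termination_by cs.length - i

-- A's loop in in-spoiler state walks exactly like findClose
theorem loopA_close (cs : List Char) (i : Nat) (ss : Int) (acc : List (Int × Int)) :
    loopAW cs i true ss acc =
      ((findClose cs i).elim acc
        (fun e => loopAW cs (e + 2) false ss (acc ++ [(ss, (e : Int))]))) := by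
  by_cases h : i < cs.length
  · by_cases hp : cs[i] = '|'
    · by_cases h2 : i + 1 < cs.length
      · by_cases hp2 : cs[i + 1] = '|'
        · rw [laT_hit cs i ss acc h hp h2 hp2, fc_hit cs i h2 hp hp2]
          rfl
        · rw [laT_step3 cs i ss acc h hp h2 hp2, fc_step cs i h2 (by tauto)]
          exact loopA_close cs (i + 1) ss acc
      · rw [laT_step2 cs i ss acc h hp h2, fc_end cs i h2,
          loopA_close cs (i + 1) ss acc, fc_end cs (i + 1) (by omega)]
    · by_cases h2 : i + 1 < cs.length
      · rw [laT_step1 cs i ss acc h hp, fc_step cs i h2 (by tauto)]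
        exact loopA_close cs (i + 1) ss acc
      · rw [laT_step1 cs i ss acc h hp, fc_end cs i h2,
          loopA_close cs (i + 1) ss acc, fc_end cs (i + 1) (by omega)]
  · rw [la_end cs i true ss acc h, fc_end cs i (by omega)]
    rfl
termination_by cs.length - i

-- once the scan position has passed idx, no later range can contain idx
theorem loopA_past (cs : List Char) (idx : Int) (i : Nat) (ss : Int) (acc : List (Int × Int))
    (hpast : idx < (i : Int)) :
    (loopAW cs i false ss acc).any (fun p => decide (p.1 ≤ idx) && decide (idx < p.2)) =
      acc.any (fun p => decide (p.1 ≤ idx) && decide (idx < p.2)) := by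
  rw [loopA_open]
  by_cases hfo : findOpenW cs i = -1
  · rw [if_pos hfo]
  · rw [if_neg hfo]
    have hb := (findOpenW_bounds cs i).resolve_left hfo
    rw [loopA_close]
    cases hfc : findClose cs ((findOpenW cs i).toNat + 2) with
    | none => rfl
    | some e =>
      have hc := findClose_some cs ((findOpenW cs i).toNat + 2) e hfc
      simp only [Option.elim]
      rw [loopA_past cs idx (e + 2) (findOpenW cs i + 2) _ (by push_cast; omega)]
      simp only [List.any_append, List.any_cons, List.any_nil]
      have hno : ¬ (findOpenW cs i + 2 ≤ idx) := by omega
      simp [hno]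
termination_by cs.length - i
decreasing_by
  have hb := (findOpenW_bounds cs i).resolve_left hfo
  have hc := findClose_some cs ((findOpenW cs i).toNat + 2) e hfc
  omega

-- main invariant: A's remaining scan + final membership pass = acc's membership ∨ B's
-- fused scan, for any sufficient fuel
theorem loopA_eq_isSpoilB (cs : List Char) (idx : Int) :
    ∀ (fuel i : Nat) (ss : Int) (acc : List (Int × Int)), cs.length + 1 - i ≤ fuel →
    (loopAW cs i false ss acc).any (fun p => decide (p.1 ≤ idx) && decide (idx < p.2)) =
      (acc.any (fun p => decide (p.1 ≤ idx) && decide (idx < p.2)) ||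
        isSpoilB cs idx i fuel) := by
  intro fuel
  induction fuel with
  | zero =>
    intro i ss acc hfuel
    rw [la_end cs i false ss acc (by omega), isSpoilB]
    simp
  | succ fuel IH =>
    intro i ss acc hfuel
    rw [loopA_open, isSpoilB, findOpen_fuel cs (cs.length + 1) i (by omega)]
    by_cases hfo : findOpenW cs i = -1
    · rw [if_pos hfo, if_pos hfo]
      simp
    · rw [if_neg hfo, if_neg hfo]
      have hb := (findOpenW_bounds cs i).resolve_left hfo
      have hk : findOpenW cs i + 2 = (((findOpenW cs i).toNat + 2 : Nat) : Int) := by omega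
      rw [loopA_close, hk, findFrom_eq_findClose cs ((findOpenW cs i).toNat + 2) (by omega)]
      cases hfc : findClose cs ((findOpenW cs i).toNat + 2) with
      | none => simp
      | some e =>
        have hc := findClose_some cs ((findOpenW cs i).toNat + 2) e hfc
        simp only [Option.elim]
        by_cases hlt : idx < (((findOpenW cs i).toNat + 2 : Nat) : Int)
        · rw [if_pos hlt]
          rw [loopA_past cs idx (e + 2) (((findOpenW cs i).toNat + 2 : Nat) : Int) _
            (by push_cast; omega)]
          simp only [List.any_append, List.any_cons, List.any_nil]
          have hno : ¬ ((((findOpenW cs i).toNat + 2 : Nat) : Int) ≤ idx) := by omega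
          simp only [decide_eq_false hno, Bool.false_and, Bool.or_false]
        · rw [if_neg hlt, if_neg (by omega)]
          rw [IH (e + 2) (((findOpenW cs i).toNat + 2 : Nat) : Int) _ (by omega)]
          have htn : ((e : Int)).toNat + 2 = e + 2 := by omega
          rw [htn]
          by_cases hie : idx < (e : Int)
          · rw [if_pos hie]
            have h1 : (decide ((((findOpenW cs i).toNat + 2 : Nat) : Int) ≤ idx) &&
                decide (idx < (e : Int))) = true := by
              simp only [Bool.and_eq_true, decide_eq_true_eq]; omega
            simp only [List.any_append, List.any_cons, List.any_nil, h1, Bool.or_false,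
              Bool.or_true, Bool.true_or]
          · rw [if_neg hie]
            have h1 : (decide ((((findOpenW cs i).toNat + 2 : Nat) : Int) ≤ idx) &&
                decide (idx < (e : Int))) = false := by
              simp only [Bool.and_eq_false_iff, decide_eq_false_iff_not]; omega
            simp only [List.any_append, List.any_cons, List.any_nil, h1, Bool.or_false]

-- ===== VERDICT (by name: the statement is the Claim_ definition above) =====
theorem is_spoil_spec : Claim_equal_is_spoil := by
  intro message idx _
  unfold Spec_is_spoil is_spoil is_spoil_alt
  by_cases h : idx ≥ (message.toList.length : Int) ∨ idx < 0
  · rw [if_pos h, if_pos (by omega)]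
  · rw [if_neg h, if_neg (by omega)]
    rw [loopA_fuel message.toList (message.toList.length + 1) 0 false (-1) [] (by omega)]
    simpa using
      loopA_eq_isSpoilB message.toList idx (message.toList.length + 1) 0 (-1) [] (by omega)
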